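-- pv_equiv track=rewrite | github.com/sb-ncbr/overprot | OverProt/working_scripts/domains_with_observed_residues.py | ranges_intersection
-- ===== SOURCE A (Python) =====
-- from typing import List, Tuple, Dict
--
-- def consolidate_ranges(ranges: List[Tuple[int,int]]) -> List[Tuple[int,int]]:
--     """Return equivalent set of ranges, which is without overlaps and sorted, e.g. [(120,155), (1,100), (150,200)] -> [(1,100), (120,200)]"""
--     stack = sorted(ranges, reverse=True)
--     result = []
--     while len(stack) >= 2:
--         head = stack[-1]
--         neck = stack[-2]
--         if neck[0] <= head[1] + 1:
--             union = (head[0], max(head[1], neck[1]))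
--             stack.pop()
--             stack.pop()
--             stack.append(union)
--         else:
--             stack.pop()
--             result.append(head)
--     result.extend(stack)
--     return result
--
-- def ranges_intersection(ranges1: List[Tuple[int,int]], ranges2: List[Tuple[int,int]]) -> List[Tuple[int,int]]:
--     """Return the intersection of two sets of ranges, e.g. [(1,100), (150,200)] + [(50,180)] -> [(50,100), (150,180)]"""
--     stack1 = sorted(consolidate_ranges(ranges1), reverse=True)
--     stack2 = sorted(consolidate_ranges(ranges2), reverse=True)
--     result = []
--     while len(stack1) > 0 and len(stack2) > 0:
--         head1 = stack1[-1]
--         head2 = stack2[-1]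
--         overlap_start = max(head1[0], head2[0])
--         overlap_end = min(head1[1], head2[1])
--         if overlap_start <= overlap_end:
--             result.append((overlap_start, overlap_end))
--         if head1[1] < head2[1]:
--             stack1.pop()
--         else:
--             stack2.pop()
--     return result
-- ===== SOURCE B (Python) =====
-- def ranges_intersection(ranges1, ranges2):
--     # Pairwise overlaps of the raw ranges, then one sort + single merge pass.
--     pieces = []
--     for a1, b1 in ranges1:
--         for a2, b2 in ranges2:
--             a = a1 if a1 >= a2 else a2
--             b = b1 if b1 <= b2 else b2
--             if a <= b:
--                 pieces.append((a, b))
--     pieces.sort()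
--     result = []
--     cur = None
--     for a, b in pieces:
--         if cur is None:
--             cur = (a, b)
--         elif a <= cur[1] + 1:
--             cur = (cur[0], max(cur[1], b))
--         else:
--             result.append(cur)
--             cur = (a, b)
--     if cur is not None:
--         result.append(cur)
--     return result
-- ===== Notes on version B (the rewrite author's own statement) =====
-- stated objective: alternative
-- what changed: A consolidates each list with a sorted stack and then merges the two consolidated lists with a two-pointer loop; B instead intersects every pair of raw ranges directly (Cartesian product of pairwise overlaps), sorts the pieces once and rebuilds the result in a single adjacent-merge pass.
import Mathlib
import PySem

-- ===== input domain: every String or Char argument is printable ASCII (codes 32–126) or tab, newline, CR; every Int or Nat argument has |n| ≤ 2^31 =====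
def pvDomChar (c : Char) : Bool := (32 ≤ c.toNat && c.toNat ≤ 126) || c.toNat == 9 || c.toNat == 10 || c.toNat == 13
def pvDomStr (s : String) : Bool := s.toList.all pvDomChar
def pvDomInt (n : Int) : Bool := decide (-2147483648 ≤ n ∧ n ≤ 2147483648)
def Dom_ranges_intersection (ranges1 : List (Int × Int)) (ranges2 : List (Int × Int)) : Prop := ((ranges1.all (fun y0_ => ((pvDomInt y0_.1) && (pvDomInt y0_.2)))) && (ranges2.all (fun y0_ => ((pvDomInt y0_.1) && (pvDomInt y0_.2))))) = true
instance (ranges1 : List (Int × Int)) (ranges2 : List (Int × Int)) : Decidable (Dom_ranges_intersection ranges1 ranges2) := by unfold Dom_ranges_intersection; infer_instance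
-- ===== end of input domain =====

-- B replaces A's per-list consolidation + two-pointer merge by a pairwise-overlap product
-- followed by one sort and a single merge pass (alternative algorithm, same results).


-- ===== PORT A =====
-- Python's `stack` list is modelled REVERSED: Lean head = Python stack[-1] (the top);
-- `sorted(xs, reverse=True)` read back-to-front = `(PySem.List.sorted xs (·.toLex?) true).reverse`.
-- Python tuple comparison is lexicographic = the `toLex` key.
def pvConsolLoop : List (Int × Int) → List (Int × Int) → List (Int × Int)
  | result, h :: n :: rest =>
    if n.1 ≤ h.2 + 1 then
      pvConsolLoop result ((h.1, max h.2 n.2) :: rest)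
    else
      pvConsolLoop (result ++ [h]) (n :: rest)
  | result, stack => result ++ stack
  termination_by _ stack => stack.length

def consolidate_ranges (ranges : List (Int × Int)) : List (Int × Int) :=
  pvConsolLoop [] ((PySem.List.sorted ranges (fun p => toLex p) true).reverse)

def pvInterLoop : List (Int × Int) → List (Int × Int) → List (Int × Int) → List (Int × Int)
  | result, h1 :: s1, h2 :: s2 =>
    let os := max h1.1 h2.1
    let oe := min h1.2 h2.2
    let result' := if os ≤ oe then result ++ [(os, oe)] else result
    if h1.2 < h2.2 then pvInterLoop result' s1 (h2 :: s2)
    else pvInterLoop result' (h1 :: s1) s2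
  | result, _, _ => result
  termination_by _ l1 l2 => l1.length + l2.length

def ranges_intersection (ranges1 : List (Int × Int)) (ranges2 : List (Int × Int)) : List (Int × Int) :=
  pvInterLoop []
    ((PySem.List.sorted (consolidate_ranges ranges1) (fun p => toLex p) true).reverse)
    ((PySem.List.sorted (consolidate_ranges ranges2) (fun p => toLex p) true).reverse)

-- ===== PORT B =====
-- `a1 if a1 >= a2 else a2` / `b1 if b1 <= b2 else b2` are kept as the same conditionals.
def pvPieces (ranges1 : List (Int × Int)) (ranges2 : List (Int × Int)) : List (Int × Int) :=
  ranges1.flatMap (fun p =>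
    ranges2.filterMap (fun q =>
      let a := if p.1 ≥ q.1 then p.1 else q.1
      let b := if p.2 ≤ q.2 then p.2 else q.2
      if a ≤ b then some (a, b) else none))

def pvMergeStep (st : List (Int × Int) × Option (Int × Int)) (p : Int × Int) :
    List (Int × Int) × Option (Int × Int) :=
  match st.2 with
  | none => (st.1, some p)
  | some c =>
    if p.1 ≤ c.2 + 1 then (st.1, some (c.1, max c.2 p.2))
    else (st.1 ++ [c], some p)

def ranges_intersection_alt (ranges1 : List (Int × Int)) (ranges2 : List (Int × Int)) : List (Int × Int) :=
  let pieces := PySem.List.sorted (pvPieces ranges1 ranges2) (fun p => toLex p) false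
  let st := pieces.foldl pvMergeStep ([], none)
  match st.2 with
  | none => st.1
  | some c => st.1 ++ [c]

-- ===== PRECONDITION & SPEC =====
def Spec_ranges_intersection (ranges1 : List (Int × Int)) (ranges2 : List (Int × Int)) (out : List (Int × Int)) : Prop := out = ranges_intersection_alt ranges1 ranges2
instance (ranges1 : List (Int × Int)) (ranges2 : List (Int × Int)) (out : List (Int × Int)) : Decidable (Spec_ranges_intersection ranges1 ranges2 out) := by unfold Spec_ranges_intersection; infer_instance

-- ===== CLAIM (what is proved, stated in full; the proofs are below) =====
def Claim_equal_ranges_intersection : Prop := ∀ (ranges1 : List (Int × Int)) (ranges2 : List (Int × Int)), Dom_ranges_intersection ranges1 ranges2 → Spec_ranges_intersection ranges1 ranges2 (ranges_intersection ranges1 ranges2)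

-- ===== LEMMAS AND PROOFS =====

-- x is covered by some range of L (ranges are inclusive [fst, snd])
def pvCov (L : List (Int × Int)) (x : Int) : Prop := ∃ p ∈ L, p.1 ≤ x ∧ x ≤ p.2
-- Python's lexicographic ≤ on int pairs
def pvLexLE (p q : Int × Int) : Prop := p.1 < q.1 ∨ (p.1 = q.1 ∧ p.2 ≤ q.2)
-- q starts strictly after p ends, with a gap of at least one integer
def pvGap (p q : Int × Int) : Prop := p.2 + 1 < q.1
-- L is THE canonical run decomposition of the point set S
def pvCanon (S : Int → Prop) (L : List (Int × Int)) : Prop :=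
  (∀ p ∈ L, p.1 ≤ p.2) ∧ List.IsChain pvGap L ∧ (∀ x, S x ↔ pvCov L x)

lemma pvCov_nil (x : Int) : pvCov [] x ↔ False := by simp [pvCov]

lemma pvCov_cons (p : Int × Int) (L : List (Int × Int)) (x : Int) :
    pvCov (p :: L) x ↔ (p.1 ≤ x ∧ x ≤ p.2) ∨ pvCov L x := by
  simp [pvCov, List.mem_cons, or_and_right, exists_or]

lemma pvCov_append (L M : List (Int × Int)) (x : Int) :
    pvCov (L ++ M) x ↔ pvCov L x ∨ pvCov M x := by
  simp [pvCov, List.mem_append, or_and_right, exists_or]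

-- in a valid gap-chained list, every tail element starts after the head's end
lemma pvCanon_head_lt {h : Int × Int} {t : List (Int × Int)}
    (hv : ∀ p ∈ h :: t, p.1 ≤ p.2) (hch : List.IsChain pvGap (h :: t)) :
    ∀ r ∈ t, h.2 + 1 < r.1 := by
  induction t generalizing h with
  | nil => intro r hr; simp at hr
  | cons n t' ih =>
    intro r hr
    have hgap : pvGap h n := (List.isChain_cons_cons.mp hch).1
    rcases List.mem_cons.mp hr with rfl | hr'
    · exact hgap
    · have hn2 : n.1 ≤ n.2 := hv n (by simp)
      have := ih (fun p hp => hv p (List.mem_cons_of_mem _ hp))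
        (List.isChain_cons_cons.mp hch).2 r hr'
      unfold pvGap at *; omega

-- in a lex-sorted gap-chained list, every tail element starts after the head's end
lemma pvSorted_head_lt {h : Int × Int} {t : List (Int × Int)}
    (hch : List.IsChain pvGap (h :: t)) (hp : List.Pairwise pvLexLE (h :: t)) :
    ∀ r ∈ t, h.2 + 1 < r.1 := by
  intro r hr
  cases t with
  | nil => simp at hr
  | cons n t' =>
    have hgap : pvGap h n := (List.isChain_cons_cons.mp hch).1
    rcases List.mem_cons.mp hr with rfl | hr'
    · exact hgap
    · have hnr : pvLexLE n r := (List.pairwise_cons.mp (List.pairwise_cons.mp hp).2).1 r hr'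
      unfold pvGap pvLexLE at *; omega

lemma pvCanon_unique : ∀ (L M : List (Int × Int)) (S : Int → Prop),
    pvCanon S L → pvCanon S M → L = M := by
  intro L
  induction L with
  | nil =>
    intro M S hL hM
    cases M with
    | nil => rfl
    | cons q M' =>
      exfalso
      have hq : S q.1 := (hM.2.2 q.1).mpr ⟨q, List.mem_cons_self, le_refl _, hM.1 q List.mem_cons_self⟩
      exact (pvCov_nil q.1).mp ((hL.2.2 q.1).mp hq)
  | cons p L' ih =>
    intro M S hL hM
    cases M with
    | nil =>
      exfalso
      have hp' : S p.1 := (hL.2.2 p.1).mpr ⟨p, List.mem_cons_self, le_refl _, hL.1 p List.mem_cons_self⟩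
      exact (pvCov_nil p.1).mp ((hM.2.2 p.1).mp hp')
    | cons q M' =>
      have hvp : p.1 ≤ p.2 := hL.1 p List.mem_cons_self
      have hvq : q.1 ≤ q.2 := hM.1 q List.mem_cons_self
      have hSp : S p.1 := (hL.2.2 p.1).mpr ⟨p, List.mem_cons_self, le_refl _, hvp⟩
      have hSq : S q.1 := (hM.2.2 q.1).mpr ⟨q, List.mem_cons_self, le_refl _, hvq⟩
      have hlbL : ∀ x, S x → p.1 ≤ x := by
        intro x hx
        rcases (hL.2.2 x).mp hx with ⟨r, hr, h1, h2⟩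
        rcases List.mem_cons.mp hr with rfl | hr'
        · exact h1
        · have := pvCanon_head_lt hL.1 hL.2.1 r hr'; omega
      have hlbM : ∀ x, S x → q.1 ≤ x := by
        intro x hx
        rcases (hM.2.2 x).mp hx with ⟨r, hr, h1, h2⟩
        rcases List.mem_cons.mp hr with rfl | hr'
        · exact h1
        · have := pvCanon_head_lt hM.1 hM.2.1 r hr'; omega
      have h1 : p.1 = q.1 := le_antisymm (hlbL q.1 hSq) (hlbM p.1 hSp)
      have hsndle : ∀ (a b : Int × Int) (A B : List (Int × Int)),
          pvCanon S (a :: A) → pvCanon S (b :: B) → a.1 = b.1 → a.2 ≤ b.2 := by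
        intro a b A B hA hB hab
        by_contra hcon
        have hva : a.1 ≤ a.2 := hA.1 a List.mem_cons_self
        have hvb : b.1 ≤ b.2 := hB.1 b List.mem_cons_self
        have hx : S (b.2 + 1) := (hA.2.2 _).mpr ⟨a, List.mem_cons_self, by omega, by omega⟩
        rcases (hB.2.2 _).mp hx with ⟨r, hr, hr1, hr2⟩
        rcases List.mem_cons.mp hr with rfl | hr'
        · omega
        · have := pvCanon_head_lt hB.1 hB.2.1 r hr'; omega
      have h2 : p.2 = q.2 :=
        le_antisymm (hsndle p q L' M' hL hM h1) (hsndle q p M' L' hM hL h1.symm)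
      have hpq : p = q := Prod.ext h1 h2
      subst hpq
      congr 1
      apply ih M' (fun x => S x ∧ p.2 < x)
      · refine ⟨fun r hr => hL.1 r (List.mem_cons_of_mem _ hr), hL.2.1.tail, ?_⟩
        intro x
        constructor
        · rintro ⟨hx, hgt⟩
          rcases (hL.2.2 x).mp hx with ⟨r, hr, ha, hb⟩
          rcases List.mem_cons.mp hr with rfl | hr'
          · exact absurd hb (by omega)
          · exact ⟨r, hr', ha, hb⟩
        · rintro ⟨r, hr', ha, hb⟩
          have hgt := pvCanon_head_lt hL.1 hL.2.1 r hr'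
          exact ⟨(hL.2.2 x).mpr ⟨r, List.mem_cons_of_mem _ hr', ha, hb⟩, by omega⟩
      · refine ⟨fun r hr => hM.1 r (List.mem_cons_of_mem _ hr), hM.2.1.tail, ?_⟩
        intro x
        constructor
        · rintro ⟨hx, hgt⟩
          rcases (hM.2.2 x).mp hx with ⟨r, hr, ha, hb⟩
          rcases List.mem_cons.mp hr with rfl | hr'
          · exact absurd hb (by omega)
          · exact ⟨r, hr', ha, hb⟩
        · rintro ⟨r, hr', ha, hb⟩
          have hgt := pvCanon_head_lt hM.1 hM.2.1 r hr'
          exact ⟨(hM.2.2 x).mpr ⟨r, List.mem_cons_of_mem _ hr', ha, hb⟩, by omega⟩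


lemma pvConsolLoop_nil (result : List (Int × Int)) : pvConsolLoop result [] = result := by
  rw [pvConsolLoop.eq_def]; simp

lemma pvConsolLoop_one (result : List (Int × Int)) (h : Int × Int) :
    pvConsolLoop result [h] = result ++ [h] := by
  rw [pvConsolLoop.eq_def]

lemma pvConsolLoop_two (result : List (Int × Int)) (h n : Int × Int) (rest : List (Int × Int)) :
    pvConsolLoop result (h :: n :: rest) =
    if n.1 ≤ h.2 + 1 then pvConsolLoop result ((h.1, max h.2 n.2) :: rest)
    else pvConsolLoop (result ++ [h]) (n :: rest) := by
  rw [pvConsolLoop.eq_def]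

lemma pvConsolLoop_spec (result stack : List (Int × Int)) :
    stack.Pairwise pvLexLE →
    result.Pairwise pvLexLE →
    List.IsChain pvGap result →
    (∀ r ∈ result, ∀ s ∈ stack, pvLexLE r s ∧ r.2 + 1 < s.1) →
    (pvConsolLoop result stack).Pairwise pvLexLE ∧
    List.IsChain pvGap (pvConsolLoop result stack) ∧
    (∀ x, pvCov (pvConsolLoop result stack) x ↔ pvCov result x ∨ pvCov stack x) := by
  have main : ∀ (m : Nat) (stack result : List (Int × Int)), stack.length ≤ m →
      stack.Pairwise pvLexLE → result.Pairwise pvLexLE → List.IsChain pvGap result →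
      (∀ r ∈ result, ∀ s ∈ stack, pvLexLE r s ∧ r.2 + 1 < s.1) →
      (pvConsolLoop result stack).Pairwise pvLexLE ∧
      List.IsChain pvGap (pvConsolLoop result stack) ∧
      (∀ x, pvCov (pvConsolLoop result stack) x ↔ pvCov result x ∨ pvCov stack x) := by
    intro m
    induction m with
    | zero =>
      intro stack result hlen hs hrp hrc hlink
      have : stack = [] := by cases stack <;> simp_all
      subst this
      rw [pvConsolLoop_nil]
      exact ⟨hrp, hrc, fun x => by rw [pvCov_nil]; tauto⟩
    | succ m ih =>
      intro stack result hlen hs hrp hrc hlink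
      match stack with
      | [] =>
        rw [pvConsolLoop_nil]
        exact ⟨hrp, hrc, fun x => by rw [pvCov_nil]; tauto⟩
      | [h] =>
        rw [pvConsolLoop_one]
        refine ⟨?_, ?_, fun x => by rw [pvCov_append]⟩
        · exact List.pairwise_append.mpr ⟨hrp, by simp,
            fun r hr b hb => by simp at hb; rw [hb]; exact (hlink r hr _ List.mem_cons_self).1⟩
        · refine List.isChain_append.mpr ⟨hrc, by simp, ?_⟩
          intro x hx y hy
          simp at hy; subst hy
          exact (hlink x (List.mem_of_getLast? hx) _ List.mem_cons_self).2
      | h :: n :: rest =>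
        obtain ⟨hh, hs1⟩ := List.pairwise_cons.mp hs
        obtain ⟨hn, hs2⟩ := List.pairwise_cons.mp hs1
        have hhn : pvLexLE h n := hh n List.mem_cons_self
        rw [pvConsolLoop_two]
        by_cases hcond : n.1 ≤ h.2 + 1
        · rw [if_pos hcond]
          have hps : ((h.1, max h.2 n.2) :: rest).Pairwise pvLexLE := by
            refine List.pairwise_cons.mpr ⟨?_, hs2⟩
            intro r hr
            have h1 := hh r (List.mem_cons_of_mem _ hr)
            have h2 := hn r hr
            unfold pvLexLE at *
            omega
          have hlink' : ∀ r ∈ result, ∀ s ∈ (h.1, max h.2 n.2) :: rest, pvLexLE r s ∧ r.2 + 1 < s.1 := by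
            intro r hr s hsm
            rcases List.mem_cons.mp hsm with rfl | hsm'
            · have h1 := hlink r hr h List.mem_cons_self
              unfold pvLexLE at *
              omega
            · exact hlink r hr s (List.mem_cons_of_mem _ (List.mem_cons_of_mem _ hsm'))
          obtain ⟨c1, c2, c3⟩ := ih ((h.1, max h.2 n.2) :: rest) result (by simp at hlen ⊢; omega) hps hrp hrc hlink'
          refine ⟨c1, c2, fun x => (c3 x).trans (or_congr Iff.rfl ?_)⟩
          rw [pvCov_cons, pvCov_cons, pvCov_cons]
          have harith : (h.1 ≤ x ∧ x ≤ max h.2 n.2) ↔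
              ((h.1 ≤ x ∧ x ≤ h.2) ∨ (n.1 ≤ x ∧ x ≤ n.2)) := by
            unfold pvLexLE at hhn; omega
          rw [harith, or_assoc]
        · rw [if_neg hcond]
          have hrp' : (result ++ [h]).Pairwise pvLexLE :=
            List.pairwise_append.mpr ⟨hrp, by simp,
              fun r hr b hb => by simp at hb; rw [hb]; exact (hlink r hr _ List.mem_cons_self).1⟩
          have hrc' : List.IsChain pvGap (result ++ [h]) := by
            refine List.isChain_append.mpr ⟨hrc, by simp, ?_⟩
            intro x hx y hy
            simp at hy; subst hy
            exact (hlink x (List.mem_of_getLast? hx) h List.mem_cons_self).2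
          have hlink' : ∀ r ∈ result ++ [h], ∀ s ∈ n :: rest, pvLexLE r s ∧ r.2 + 1 < s.1 := by
            intro r hr s hsm
            rcases List.mem_append.mp hr with hr' | hr'
            · exact hlink r hr' s (List.mem_cons_of_mem _ hsm)
            · simp at hr'; subst hr'
              rcases List.mem_cons.mp hsm with rfl | hsm'
              · exact ⟨hhn, by omega⟩
              · have h1 := hh s (List.mem_cons_of_mem _ hsm')
                have h2 := hn s hsm'
                unfold pvLexLE at *
                constructor
                · omega
                · omega
          obtain ⟨c1, c2, c3⟩ := ih (n :: rest) (result ++ [h]) (by simp at hlen ⊢; omega) hs1 hrp' hrc' hlink'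
          refine ⟨c1, c2, fun x => (c3 x).trans ?_⟩
          simp only [pvCov_append, pvCov_cons, pvCov_nil]
          tauto
  exact main stack.length stack result le_rfl

lemma pvRevSorted_pairwise (xs : List (Int × Int)) :
    ((PySem.List.sorted xs (fun p => toLex p) true).reverse).Pairwise pvLexLE := by
  rw [List.pairwise_reverse]
  have h := PySem.List.sorted_pairwise_rev xs (fun p => toLex p)
  refine h.imp ?_
  intro a b hab
  have := Prod.Lex.le_iff.mp hab
  unfold pvLexLE
  simpa using this

lemma pvRevSorted_cov (xs : List (Int × Int)) (x : Int) :
    pvCov ((PySem.List.sorted xs (fun p => toLex p) true).reverse) x ↔ pvCov xs x := by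
  unfold pvCov
  constructor
  · rintro ⟨p, hp, h⟩
    exact ⟨p, (PySem.List.mem_sorted _ _ _ _).mp (List.mem_reverse.mp hp), h⟩
  · rintro ⟨p, hp, h⟩
    exact ⟨p, List.mem_reverse.mpr ((PySem.List.mem_sorted _ _ _ _).mpr hp), h⟩

lemma pvConsolidate_spec (r : List (Int × Int)) :
    (consolidate_ranges r).Pairwise pvLexLE ∧
    List.IsChain pvGap (consolidate_ranges r) ∧
    (∀ x, pvCov (consolidate_ranges r) x ↔ pvCov r x) := by
  obtain ⟨c1, c2, c3⟩ := pvConsolLoop_spec []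
    ((PySem.List.sorted r (fun p => toLex p) true).reverse)
    (pvRevSorted_pairwise r) List.Pairwise.nil (by simp) (by simp)
  refine ⟨c1, c2, fun x => (c3 x).trans ?_⟩
  rw [pvCov_nil, pvRevSorted_cov]
  tauto

lemma pvRevSorted_self {C : List (Int × Int)} (hp : C.Pairwise pvLexLE) :
    (PySem.List.sorted C (fun p => toLex p) true).reverse = C := by
  have hperm : ((PySem.List.sorted C (fun p => toLex p) true).reverse).Perm C :=
    (List.reverse_perm _).trans (PySem.List.sorted_perm C _ true)
  have hgen : ∀ (L M : List (Int × Int)), L.Perm M → L.Pairwise pvLexLE →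
      M.Pairwise pvLexLE → L = M := by
    intro L
    induction L with
    | nil =>
      intro M h _ _
      exact (List.Perm.eq_nil h.symm).symm
    | cons p L' ihL =>
      intro M h hL hM
      cases M with
      | nil => simpa using List.Perm.eq_nil h
      | cons q M' =>
        have hpq : p = q := by
          have hpM : p ∈ q :: M' := h.subset List.mem_cons_self
          have hqL : q ∈ p :: L' := h.symm.subset List.mem_cons_self
          rcases List.mem_cons.mp hpM with h1 | h1
          · exact h1
          · rcases List.mem_cons.mp hqL with h2 | h2
            · exact h2.symm
            · have hq := (List.pairwise_cons.mp hM).1 p h1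
              have hp := (List.pairwise_cons.mp hL).1 q h2
              unfold pvLexLE at *
              have : p.1 = q.1 ∧ p.2 = q.2 := by omega
              exact Prod.ext this.1 this.2
        subst hpq
        rw [ihL M' h.cons_inv (List.pairwise_cons.mp hL).2 (List.pairwise_cons.mp hM).2]
  exact hgen _ _ hperm (pvRevSorted_pairwise C) hp


lemma pvInterLoop_nil_left (res l2 : List (Int × Int)) : pvInterLoop res [] l2 = res := by
  rw [pvInterLoop.eq_def]

lemma pvInterLoop_nil_right (res l1 : List (Int × Int)) : pvInterLoop res l1 [] = res := by
  rw [pvInterLoop.eq_def]; cases l1 <;> rfl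

lemma pvInterLoop_cons (res : List (Int × Int)) (h1 h2 : Int × Int) (s1 s2 : List (Int × Int)) :
    pvInterLoop res (h1 :: s1) (h2 :: s2) =
    if h1.2 < h2.2 then
      pvInterLoop (if max h1.1 h2.1 ≤ min h1.2 h2.2 then res ++ [(max h1.1 h2.1, min h1.2 h2.2)] else res) s1 (h2 :: s2)
    else
      pvInterLoop (if max h1.1 h2.1 ≤ min h1.2 h2.2 then res ++ [(max h1.1 h2.1, min h1.2 h2.2)] else res) (h1 :: s1) s2 := by
  rw [pvInterLoop.eq_def]

lemma pvInterLoop_acc : ∀ (n : Nat) (l1 l2 res : List (Int × Int)), l1.length + l2.length ≤ n →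
    pvInterLoop res l1 l2 = res ++ pvInterLoop [] l1 l2 := by
  intro n
  induction n with
  | zero =>
    intro l1 l2 res hlen
    have h1 : l1 = [] := by cases l1 <;> simp_all
    subst h1
    rw [pvInterLoop_nil_left, pvInterLoop_nil_left]
    simp
  | succ n ih =>
    intro l1 l2 res hlen
    match l1, l2 with
    | [], l2 => rw [pvInterLoop_nil_left, pvInterLoop_nil_left]; simp
    | h1 :: s1, [] => rw [pvInterLoop_nil_right, pvInterLoop_nil_right]; simp
    | h1 :: s1, h2 :: s2 =>
      rw [pvInterLoop_cons, pvInterLoop_cons]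
      have hlen1 : s1.length + (h2 :: s2).length ≤ n := by simp at hlen ⊢; omega
      have hlen2 : (h1 :: s1).length + s2.length ≤ n := by simp at hlen ⊢; omega
      by_cases hlt : h1.2 < h2.2
      · rw [if_pos hlt, if_pos hlt]
        by_cases hg : max h1.1 h2.1 ≤ min h1.2 h2.2
        · rw [if_pos hg, if_pos hg,
            ih s1 (h2 :: s2) (res ++ [(max h1.1 h2.1, min h1.2 h2.2)]) hlen1,
            ih s1 (h2 :: s2) ([] ++ [(max h1.1 h2.1, min h1.2 h2.2)]) hlen1]
          simp
        · rw [if_neg hg, if_neg hg, ih s1 (h2 :: s2) res hlen1,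
            ih s1 (h2 :: s2) [] hlen1]
      · rw [if_neg hlt, if_neg hlt]
        by_cases hg : max h1.1 h2.1 ≤ min h1.2 h2.2
        · rw [if_pos hg, if_pos hg,
            ih (h1 :: s1) s2 (res ++ [(max h1.1 h2.1, min h1.2 h2.2)]) hlen2,
            ih (h1 :: s1) s2 ([] ++ [(max h1.1 h2.1, min h1.2 h2.2)]) hlen2]
          simp
        · rw [if_neg hg, if_neg hg, ih (h1 :: s1) s2 res hlen2,
            ih (h1 :: s1) s2 [] hlen2]

lemma pvInterLoop_spec : ∀ (n : Nat) (l1 l2 : List (Int × Int)), l1.length + l2.length ≤ n →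
    l1.Pairwise pvLexLE → List.IsChain pvGap l1 →
    l2.Pairwise pvLexLE → List.IsChain pvGap l2 →
    (∀ p ∈ pvInterLoop [] l1 l2, p.1 ≤ p.2) ∧
    List.IsChain pvGap (pvInterLoop [] l1 l2) ∧
    (∀ x, pvCov (pvInterLoop [] l1 l2) x ↔ pvCov l1 x ∧ pvCov l2 x) ∧
    (∀ p ∈ pvInterLoop [] l1 l2, ∀ h1 ∈ l1.head?, ∀ h2 ∈ l2.head?, max h1.1 h2.1 ≤ p.1) := by
  intro n
  induction n with
  | zero =>
    intro l1 l2 hlen _ _ _ _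
    have h1 : l1 = [] := by cases l1 <;> simp_all
    subst h1
    rw [pvInterLoop_nil_left]
    exact ⟨by simp, by simp, fun x => by rw [pvCov_nil]; simp, by simp⟩
  | succ n ih =>
    intro l1 l2 hlen hp1 hc1 hp2 hc2
    match l1, l2 with
    | [], l2 =>
      rw [pvInterLoop_nil_left]
      exact ⟨by simp, by simp, fun x => by rw [pvCov_nil]; simp, by simp⟩
    | h1 :: s1, [] =>
      rw [pvInterLoop_nil_right]
      refine ⟨by simp, by simp, fun x => by rw [pvCov_nil]; simp, by simp⟩
    | h1 :: s1, h2 :: s2 =>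
      rw [pvInterLoop_cons]
      by_cases hlt : h1.2 < h2.2
      · rw [if_pos hlt]
        have hlen' : s1.length + (h2 :: s2).length ≤ n := by simp at hlen ⊢; omega
        obtain ⟨ia, ib, ic, ihd⟩ := ih s1 (h2 :: s2) hlen'
          (List.pairwise_cons.mp hp1).2 hc1.tail hp2 hc2
        have hacc : pvInterLoop (if max h1.1 h2.1 ≤ min h1.2 h2.2 then [] ++ [(max h1.1 h2.1, min h1.2 h2.2)] else []) s1 (h2 :: s2) =
            (if max h1.1 h2.1 ≤ min h1.2 h2.2 then [(max h1.1 h2.1, min h1.2 h2.2)] else []) ++ pvInterLoop [] s1 (h2 :: s2) := by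
          rw [pvInterLoop_acc (s1.length + (h2 :: s2).length) s1 (h2 :: s2) _ le_rfl]
          split_ifs <;> simp
        rw [hacc]
        set rec := pvInterLoop [] s1 (h2 :: s2) with hrec
        have hrecnil : s1 = [] → rec = [] := by
          intro h; rw [hrec, h, pvInterLoop_nil_left]
        have hfut : ∀ p ∈ rec, min h1.2 h2.2 + 1 < p.1 := by
          intro p hp
          cases hs1c : s1 with
          | nil => rw [hrecnil hs1c] at hp; simp at hp
          | cons nh1 s1' =>
            have hmax : max nh1.1 h2.1 ≤ p.1 := by
              apply ihd p hp nh1 ?_ h2 ?_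
              · rw [hs1c]; simp
              · simp
            have hgap : pvGap h1 nh1 := by
              rw [hs1c] at hc1
              exact (List.isChain_cons_cons.mp hc1).1
            unfold pvGap at hgap
            omega
        have hh2cov : ∀ {y : Int}, h1.1 ≤ y → y ≤ h1.2 → pvCov (h2 :: s2) y → (h2.1 ≤ y ∧ y ≤ h2.2) := by
          intro y hy1 hy2 hcv
          rcases (pvCov_cons _ _ _).mp hcv with h | ⟨r, hr, hr1, hr2⟩
          · exact h
          · have := pvSorted_head_lt hc2 hp2 r hr
            omega
        refine ⟨?_, ?_, ?_, ?_⟩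
        · intro p hp
          rcases List.mem_append.mp hp with hp' | hp'
          · split_ifs at hp' with hg
            · simp at hp'; subst hp'; exact hg
            · simp at hp'
          · exact ia p hp'
        · by_cases hg : max h1.1 h2.1 ≤ min h1.2 h2.2
          · rw [if_pos hg]
            cases hrc : rec with
            | nil => simp
            | cons q rec' =>
              rw [List.singleton_append]
              refine List.isChain_cons_cons.mpr ⟨?_, hrc ▸ ib⟩
              exact hfut q (by rw [hrc]; exact List.mem_cons_self)
          · rw [if_neg hg]; simpa using ib
        · intro x
          rw [pvCov_append, ic x]
          by_cases hg : max h1.1 h2.1 ≤ min h1.2 h2.2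
          · rw [if_pos hg]
            have hsing : pvCov [(max h1.1 h2.1, min h1.2 h2.2)] x ↔
                (max h1.1 h2.1 ≤ x ∧ x ≤ min h1.2 h2.2) := by
              rw [pvCov_cons, pvCov_nil]; simp
            rw [hsing]
            constructor
            · rintro (⟨hx1, hx2⟩ | ⟨hcs1, hcl2⟩)
              · exact ⟨(pvCov_cons _ _ _).mpr (Or.inl ⟨by omega, by omega⟩),
                  (pvCov_cons _ _ _).mpr (Or.inl ⟨by omega, by omega⟩)⟩
              · exact ⟨(pvCov_cons _ _ _).mpr (Or.inr hcs1), hcl2⟩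
            · rintro ⟨hcl1, hcl2⟩
              rcases (pvCov_cons _ _ _).mp hcl1 with ⟨hx1, hx2⟩ | hcs1
              · have hxh2 := hh2cov hx1 hx2 hcl2
                exact Or.inl ⟨by omega, by omega⟩
              · exact Or.inr ⟨hcs1, hcl2⟩
          · rw [if_neg hg, pvCov_nil, false_or]
            constructor
            · rintro ⟨hcs1, hcl2⟩
              exact ⟨(pvCov_cons _ _ _).mpr (Or.inr hcs1), hcl2⟩
            · rintro ⟨hcl1, hcl2⟩
              rcases (pvCov_cons _ _ _).mp hcl1 with ⟨hx1, hx2⟩ | hcs1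
              · have hxh2 := hh2cov hx1 hx2 hcl2
                exact absurd (by omega : max h1.1 h2.1 ≤ min h1.2 h2.2) hg
              · exact ⟨hcs1, hcl2⟩
        · intro p hp a ha b hb
          simp at ha hb
          subst ha; subst hb
          rcases List.mem_append.mp hp with hp' | hp'
          · split_ifs at hp' with hg
            · simp at hp'; subst hp'; simp
            · simp at hp'
          · cases hs1c : s1 with
            | nil => rw [hrecnil hs1c] at hp'; simp at hp'
            | cons nh1 s1' =>
              have hmax : max nh1.1 h2.1 ≤ p.1 := by
                apply ihd p hp' nh1 ?_ h2 ?_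
                · rw [hs1c]; simp
                · simp
              have hlex : pvLexLE h1 nh1 :=
                (List.pairwise_cons.mp hp1).1 nh1 (by rw [hs1c]; exact List.mem_cons_self)
              unfold pvLexLE at hlex
              omega
      · rw [if_neg hlt]
        have hlen' : (h1 :: s1).length + s2.length ≤ n := by simp at hlen ⊢; omega
        obtain ⟨ia, ib, ic, ihd⟩ := ih (h1 :: s1) s2 hlen'
          hp1 hc1 (List.pairwise_cons.mp hp2).2 hc2.tail
        have hacc : pvInterLoop (if max h1.1 h2.1 ≤ min h1.2 h2.2 then [] ++ [(max h1.1 h2.1, min h1.2 h2.2)] else []) (h1 :: s1) s2 =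
            (if max h1.1 h2.1 ≤ min h1.2 h2.2 then [(max h1.1 h2.1, min h1.2 h2.2)] else []) ++ pvInterLoop [] (h1 :: s1) s2 := by
          rw [pvInterLoop_acc ((h1 :: s1).length + s2.length) (h1 :: s1) s2 _ le_rfl]
          split_ifs <;> simp
        rw [hacc]
        set rec := pvInterLoop [] (h1 :: s1) s2 with hrec
        have hrecnil : s2 = [] → rec = [] := by
          intro h; rw [hrec, h, pvInterLoop_nil_right]
        have hfut : ∀ p ∈ rec, min h1.2 h2.2 + 1 < p.1 := by
          intro p hp
          cases hs2c : s2 with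
          | nil => rw [hrecnil hs2c] at hp; simp at hp
          | cons nh2 s2' =>
            have hmax : max h1.1 nh2.1 ≤ p.1 := by
              apply ihd p hp h1 ?_ nh2 ?_
              · simp
              · rw [hs2c]; simp
            have hgap : pvGap h2 nh2 := by
              rw [hs2c] at hc2
              exact (List.isChain_cons_cons.mp hc2).1
            unfold pvGap at hgap
            omega
        have hh1cov : ∀ {y : Int}, h2.1 ≤ y → y ≤ h2.2 → pvCov (h1 :: s1) y → (h1.1 ≤ y ∧ y ≤ h1.2) := by
          intro y hy1 hy2 hcv
          rcases (pvCov_cons _ _ _).mp hcv with h | ⟨r, hr, hr1, hr2⟩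
          · exact h
          · have := pvSorted_head_lt hc1 hp1 r hr
            omega
        refine ⟨?_, ?_, ?_, ?_⟩
        · intro p hp
          rcases List.mem_append.mp hp with hp' | hp'
          · split_ifs at hp' with hg
            · simp at hp'; subst hp'; exact hg
            · simp at hp'
          · exact ia p hp'
        · by_cases hg : max h1.1 h2.1 ≤ min h1.2 h2.2
          · rw [if_pos hg]
            cases hrc : rec with
            | nil => simp
            | cons q rec' =>
              rw [List.singleton_append]
              refine List.isChain_cons_cons.mpr ⟨?_, hrc ▸ ib⟩
              exact hfut q (by rw [hrc]; exact List.mem_cons_self)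
          · rw [if_neg hg]; simpa using ib
        · intro x
          rw [pvCov_append, ic x]
          by_cases hg : max h1.1 h2.1 ≤ min h1.2 h2.2
          · rw [if_pos hg]
            have hsing : pvCov [(max h1.1 h2.1, min h1.2 h2.2)] x ↔
                (max h1.1 h2.1 ≤ x ∧ x ≤ min h1.2 h2.2) := by
              rw [pvCov_cons, pvCov_nil]; simp
            rw [hsing]
            constructor
            · rintro (⟨hx1, hx2⟩ | ⟨hcl1, hcs2⟩)
              · exact ⟨(pvCov_cons _ _ _).mpr (Or.inl ⟨by omega, by omega⟩),
                  (pvCov_cons _ _ _).mpr (Or.inl ⟨by omega, by omega⟩)⟩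
              · exact ⟨hcl1, (pvCov_cons _ _ _).mpr (Or.inr hcs2)⟩
            · rintro ⟨hcl1, hcl2⟩
              rcases (pvCov_cons _ _ _).mp hcl2 with ⟨hx1, hx2⟩ | hcs2
              · have hxh1 := hh1cov hx1 hx2 hcl1
                exact Or.inl ⟨by omega, by omega⟩
              · exact Or.inr ⟨hcl1, hcs2⟩
          · rw [if_neg hg, pvCov_nil, false_or]
            constructor
            · rintro ⟨hcl1, hcs2⟩
              exact ⟨hcl1, (pvCov_cons _ _ _).mpr (Or.inr hcs2)⟩
            · rintro ⟨hcl1, hcl2⟩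
              rcases (pvCov_cons _ _ _).mp hcl2 with ⟨hx1, hx2⟩ | hcs2
              · have hxh1 := hh1cov hx1 hx2 hcl1
                exact absurd (by omega : max h1.1 h2.1 ≤ min h1.2 h2.2) hg
              · exact ⟨hcl1, hcs2⟩
        · intro p hp a ha b hb
          simp at ha hb
          subst ha; subst hb
          rcases List.mem_append.mp hp with hp' | hp'
          · split_ifs at hp' with hg
            · simp at hp'; subst hp'; simp
            · simp at hp'
          · cases hs2c : s2 with
            | nil => rw [hrecnil hs2c] at hp'; simp at hp'
            | cons nh2 s2' =>
              have hmax : max h1.1 nh2.1 ≤ p.1 := by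
                apply ihd p hp' h1 ?_ nh2 ?_
                · simp
                · rw [hs2c]; simp
              have hlex : pvLexLE h2 nh2 :=
                (List.pairwise_cons.mp hp2).1 nh2 (by rw [hs2c]; exact List.mem_cons_self)
              unfold pvLexLE at hlex
              omega

lemma pvA_canon (r1 r2 : List (Int × Int)) :
    pvCanon (fun x => pvCov r1 x ∧ pvCov r2 x) (ranges_intersection r1 r2) := by
  obtain ⟨hq1, hch1, hcov1⟩ := pvConsolidate_spec r1
  obtain ⟨hq2, hch2, hcov2⟩ := pvConsolidate_spec r2
  have e1 := pvRevSorted_self hq1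
  have e2 := pvRevSorted_self hq2
  have heq : ranges_intersection r1 r2 =
      pvInterLoop [] (consolidate_ranges r1) (consolidate_ranges r2) := by
    rw [ranges_intersection, e1, e2]
  rw [heq]
  obtain ⟨ha, hb, hc, _⟩ := pvInterLoop_spec
    ((consolidate_ranges r1).length + (consolidate_ranges r2).length)
    (consolidate_ranges r1) (consolidate_ranges r2) le_rfl hq1 hch1 hq2 hch2
  refine ⟨ha, hb, fun x => ?_⟩
  show (pvCov r1 x ∧ pvCov r2 x) ↔ _
  rw [hc x, hcov1 x, hcov2 x]

def pvFinalize (st : List (Int × Int) × Option (Int × Int)) : List (Int × Int) :=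
  match st.2 with
  | none => st.1
  | some c => st.1 ++ [c]

lemma pvPieces_cov (r1 r2 : List (Int × Int)) (x : Int) :
    pvCov (pvPieces r1 r2) x ↔ pvCov r1 x ∧ pvCov r2 x := by
  constructor
  · rintro ⟨p, hp, hx1, hx2⟩
    simp only [pvPieces, List.mem_flatMap, List.mem_filterMap] at hp
    obtain ⟨a, ha, b, hb, heq⟩ := hp
    by_cases hg : (if a.1 ≥ b.1 then a.1 else b.1) ≤ (if a.2 ≤ b.2 then a.2 else b.2)
    · rw [if_pos hg] at heq
      injection heq with heq'
      subst heq'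
      have hx1' : (if a.1 ≥ b.1 then a.1 else b.1) ≤ x := hx1
      have hx2' : x ≤ (if a.2 ≤ b.2 then a.2 else b.2) := hx2
      refine ⟨⟨a, ha, ?_, ?_⟩, ⟨b, hb, ?_, ?_⟩⟩ <;> split_ifs at hx1' hx2' hg <;> omega
    · rw [if_neg hg] at heq
      simp at heq
  · rintro ⟨⟨a, ha, ha1, ha2⟩, ⟨b, hb, hb1, hb2⟩⟩
    refine ⟨(if a.1 ≥ b.1 then a.1 else b.1, if a.2 ≤ b.2 then a.2 else b.2), ?_, ?_, ?_⟩
    · simp only [pvPieces, List.mem_flatMap, List.mem_filterMap]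
      refine ⟨a, ha, b, hb, ?_⟩
      rw [if_pos (by split_ifs <;> omega)]
    · split_ifs <;> omega
    · split_ifs <;> omega

lemma pvPieces_valid (r1 r2 : List (Int × Int)) : ∀ p ∈ pvPieces r1 r2, p.1 ≤ p.2 := by
  intro p hp
  simp only [pvPieces, List.mem_flatMap, List.mem_filterMap] at hp
  obtain ⟨a, _, b, _, heq⟩ := hp
  by_cases hg : (if a.1 ≥ b.1 then a.1 else b.1) ≤ (if a.2 ≤ b.2 then a.2 else b.2)
  · rw [if_pos hg] at heq
    injection heq with heq'
    subst heq'
    exact hg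
  · rw [if_neg hg] at heq
    simp at heq

lemma pvMerge_go : ∀ (ps : List (Int × Int)) (c : Int × Int),
    (∀ p ∈ ps, p.1 ≤ p.2) → c.1 ≤ c.2 →
    ps.Pairwise (fun p q => p.1 ≤ q.1) → (∀ p ∈ ps, c.1 ≤ p.1) →
    ∃ out : List (Int × Int),
      (∀ res : List (Int × Int), pvFinalize (ps.foldl pvMergeStep (res, some c)) = res ++ out) ∧
      List.IsChain pvGap out ∧ (∀ p ∈ out, p.1 ≤ p.2) ∧
      (∀ x, pvCov out x ↔ (c.1 ≤ x ∧ x ≤ c.2) ∨ pvCov ps x) ∧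
      (∃ d, out.head? = some (c.1, d)) := by
  intro ps
  induction ps with
  | nil =>
    intro c hv hc hs hge
    refine ⟨[c], fun res => by simp [pvFinalize], by simp, ?_, ?_, ⟨c.2, by simp⟩⟩
    · intro p hp; simp at hp; subst hp; exact hc
    · intro x; rw [pvCov_cons]
  | cons p ps' ih =>
    intro c hv hc hs hge
    have hstep : ∀ res : List (Int × Int),
        List.foldl pvMergeStep (res, some c) (p :: ps') =
        if p.1 ≤ c.2 + 1 then List.foldl pvMergeStep (res, some (c.1, max c.2 p.2)) ps'
        else List.foldl pvMergeStep (res ++ [c], some p) ps' := by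
      intro res
      rw [List.foldl_cons]
      by_cases hpc : p.1 ≤ c.2 + 1 <;> simp [pvMergeStep, hpc]
    by_cases hpc : p.1 ≤ c.2 + 1
    · obtain ⟨out, hfin, hch, hv', hcov, hd⟩ := ih (c.1, max c.2 p.2)
        (fun q hq => hv q (List.mem_cons_of_mem _ hq))
        (by simp; omega)
        (List.pairwise_cons.mp hs).2
        (fun q hq => by
          have h1 := hge p List.mem_cons_self
          have h2 := (List.pairwise_cons.mp hs).1 q hq
          simp only []
          omega)
      refine ⟨out, fun res => by rw [hstep res, if_pos hpc]; exact hfin res, hch, hv', ?_, ?_⟩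
      · intro x
        rw [hcov x, pvCov_cons]
        have hp2 : p.1 ≤ p.2 := hv p List.mem_cons_self
        have hg1 : c.1 ≤ p.1 := hge p List.mem_cons_self
        have harith : (c.1 ≤ x ∧ x ≤ max c.2 p.2) ↔
            ((c.1 ≤ x ∧ x ≤ c.2) ∨ (p.1 ≤ x ∧ x ≤ p.2)) := by omega
        rw [show ((c.1, max c.2 p.2).1 ≤ x ∧ x ≤ (c.1, max c.2 p.2).2) = (c.1 ≤ x ∧ x ≤ max c.2 p.2) from rfl,
          harith, or_assoc]

      · simpa using hd
    · obtain ⟨out, hfin, hch, hv', hcov, ⟨d, hd⟩⟩ := ih p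
        (fun q hq => hv q (List.mem_cons_of_mem _ hq))
        (hv p List.mem_cons_self)
        (List.pairwise_cons.mp hs).2
        (fun q hq => (List.pairwise_cons.mp hs).1 q hq)
      refine ⟨c :: out, ?_, ?_, ?_, ?_, ⟨c.2, by simp⟩⟩
      · intro res
        rw [hstep res, if_neg hpc, hfin (res ++ [c]), List.append_assoc, List.singleton_append]
      · cases hout : out with
        | nil => simp
        | cons q out' =>
          have hq : q = (p.1, d) := by
            rw [hout] at hd
            simpa using hd
          refine List.isChain_cons_cons.mpr ⟨?_, hout ▸ hch⟩
          rw [hq]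
          show c.2 + 1 < p.1
          omega
      · intro r hr
        rcases List.mem_cons.mp hr with rfl | hr'
        · exact hc
        · exact hv' r hr'
      · intro x
        rw [pvCov_cons, hcov x, pvCov_cons]

lemma pvB_canon (r1 r2 : List (Int × Int)) :
    pvCanon (fun x => pvCov r1 x ∧ pvCov r2 x) (ranges_intersection_alt r1 r2) := by
  have halt : ranges_intersection_alt r1 r2 =
      pvFinalize ((PySem.List.sorted (pvPieces r1 r2) (fun p => toLex p) false).foldl pvMergeStep ([], none)) := rfl
  have hmem : ∀ p, p ∈ PySem.List.sorted (pvPieces r1 r2) (fun p => toLex p) false ↔ p ∈ pvPieces r1 r2 :=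
    fun p => PySem.List.mem_sorted _ _ _ p
  have hcovs : ∀ x, pvCov (PySem.List.sorted (pvPieces r1 r2) (fun p => toLex p) false) x ↔
      (pvCov r1 x ∧ pvCov r2 x) := by
    intro x
    rw [← pvPieces_cov r1 r2 x]
    unfold pvCov
    constructor
    · rintro ⟨p, hp, h⟩; exact ⟨p, (hmem p).mp hp, h⟩
    · rintro ⟨p, hp, h⟩; exact ⟨p, (hmem p).mpr hp, h⟩
  have hstart : (PySem.List.sorted (pvPieces r1 r2) (fun p => toLex p) false).Pairwise
      (fun p q : Int × Int => p.1 ≤ q.1) := by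
    have h := PySem.List.sorted_pairwise (pvPieces r1 r2) (fun p => toLex p)
    refine h.imp ?_
    intro a b hab
    have := Prod.Lex.le_iff.mp hab
    simp at this
    omega
  cases hps : PySem.List.sorted (pvPieces r1 r2) (fun p => toLex p) false with
  | nil =>
    rw [halt, hps]
    refine ⟨?_, ?_, fun x => ?_⟩
    · intro q hq
      simp [pvFinalize] at hq
    · show List.IsChain pvGap ([] : List (Int × Int))
      simp
    · show (pvCov r1 x ∧ pvCov r2 x) ↔ pvCov ([] : List (Int × Int)) x
      rw [← hcovs x, hps]
  | cons p ps' =>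
    have hvps : ∀ q ∈ p :: ps', q.1 ≤ q.2 := by
      intro q hq
      exact pvPieces_valid r1 r2 q ((hmem q).mp (hps ▸ hq))
    rw [hps] at hstart
    obtain ⟨out, hfin, hch, hv', hcov, _⟩ := pvMerge_go ps' p
      (fun q hq => hvps q (List.mem_cons_of_mem _ hq))
      (hvps p List.mem_cons_self)
      (List.pairwise_cons.mp hstart).2
      (fun q hq => by
        have := (List.pairwise_cons.mp hstart).1 q hq
        omega)
    have houtp : ranges_intersection_alt r1 r2 = out := by
      rw [halt, hps, List.foldl_cons]
      rw [show pvMergeStep ([], none) p = (([] : List (Int × Int)), some p) from rfl]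
      have := hfin []
      simpa using this
    rw [houtp]
    refine ⟨hv', hch, fun x => ?_⟩
    show (pvCov r1 x ∧ pvCov r2 x) ↔ pvCov out x
    rw [hcov x, ← hcovs x, hps, pvCov_cons]

-- ===== VERDICT (by name: the statement is the Claim_ definition above) =====
theorem ranges_intersection_spec : Claim_equal_ranges_intersection := by
  intro r1 r2 _
  unfold Spec_ranges_intersection
  exact pvCanon_unique _ _ _ (pvA_canon r1 r2) (pvB_canon r1 r2)
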